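-- pv_equiv track=rewrite | github.com/octapoolorg/person | data/scripts/update/main.py | filter_meanings
-- ===== SOURCE A (Python) =====
-- def filter_meanings(meanings_list):
--     cleaned_meanings = [meaning.strip() for meaning in meanings_list if meaning.strip()]
--
--     # Filter out meanings that are contained in others
--     filtered_meanings = []
--     for meaning in cleaned_meanings:
--         if not any(meaning != other and meaning in other for other in cleaned_meanings):
--             filtered_meanings.append(meaning)
--
--     # Deduplicate while preserving order
--     final_meanings = []
--     for meaning in filtered_meanings:
--         if meaning not in final_meanings:
--             final_meanings.append(meaning)
--
--     # convert to title case
--     final_meanings = [meaning.title() for meaning in final_meanings]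
--
--     return final_meanings
-- ===== SOURCE B (Python) =====
-- def filter_meanings(meanings_list):
--     # distinct stripped non-empty meanings, first occurrences in order
--     distinct = list(dict.fromkeys(m.strip() for m in meanings_list if m.strip()))
--     # greedy maximal-strings scan: longest first, keep a string only if no
--     # already-kept (longer-or-equal) string contains it; every string is a
--     # substring of some kept maximal string, so this check suffices
--     maximal = []
--     for s in sorted(distinct, key=len, reverse=True):
--         if not any(s in t for t in maximal):
--             maximal.append(s)
--     keep = set(maximal)
--     return [s.title() for s in distinct if s in keep]
-- ===== Notes on version B (the rewrite author's own statement) =====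
-- stated objective: faster
-- what changed: Instead of testing every cleaned meaning against every other cleaned meaning for substring containment, B deduplicates first and runs one greedy longest-first scan that keeps only maximal strings, checking each candidate only against the already-kept maximal set, then one membership-filter pass restores the original order.
import Mathlib
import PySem

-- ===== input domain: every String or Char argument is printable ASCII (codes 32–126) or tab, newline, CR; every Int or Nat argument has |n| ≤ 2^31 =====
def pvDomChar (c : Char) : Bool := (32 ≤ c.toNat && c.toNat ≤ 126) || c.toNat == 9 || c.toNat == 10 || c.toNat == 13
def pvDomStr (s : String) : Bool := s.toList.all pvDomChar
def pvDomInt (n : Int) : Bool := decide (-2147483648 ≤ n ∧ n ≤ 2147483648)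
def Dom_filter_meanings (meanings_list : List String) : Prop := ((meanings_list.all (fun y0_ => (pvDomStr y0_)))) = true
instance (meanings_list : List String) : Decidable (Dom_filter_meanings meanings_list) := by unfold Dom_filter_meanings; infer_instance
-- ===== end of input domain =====

-- B replaces A's all-pairs substring scan by a single greedy longest-first scan that keeps
-- only maximal strings, then one membership-filter pass over the deduplicated list (objective: faster, measured).

-- shared helper: hand port of str.title(), exact on the ASCII domain (a letter is uppercased
-- after a non-letter and lowercased after a letter; non-letters pass through)
def pyAlpha (c : Char) : Bool := decide (('a' ≤ c ∧ c ≤ 'z') ∨ ('A' ≤ c ∧ c ≤ 'Z'))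

def pyTitleChar (prev : Bool) (c : Char) : Char :=
  if pyAlpha c then
    if prev then (if 'A' ≤ c ∧ c ≤ 'Z' then Char.ofNat (c.toNat + 32) else c)
    else (if 'a' ≤ c ∧ c ≤ 'z' then Char.ofNat (c.toNat - 32) else c)
  else c

def pyTitle (s : List Char) : List Char :=
  (s.foldl (fun (st : List Char × Bool) c => (st.1 ++ [pyTitleChar st.2 c], pyAlpha c)) ([], false)).1

-- ===== PORT A =====
def filter_meanings (meanings_list : List String) : List String :=
  let cleaned := ((meanings_list.map String.toList).filter
      (fun m => !(PySem.Chars.strip m).isEmpty)).map (fun m => PySem.Chars.strip m)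
  let filtered := cleaned.foldl (fun acc m =>
      if cleaned.any (fun o => decide (m ≠ o) && PySem.Chars.isIn m o) then acc else acc ++ [m]) []
  let finals := filtered.foldl (fun acc m => if acc.contains m then acc else acc ++ [m]) []
  (finals.map pyTitle).map String.ofList

-- ===== PORT B =====
def filter_meanings_alt (meanings_list : List String) : List String :=
  let distinct := PySem.List.dedup (((meanings_list.map String.toList).filter
      (fun m => !(PySem.Chars.strip m).isEmpty)).map (fun m => PySem.Chars.strip m))
  let maximal := (PySem.List.sorted distinct (fun s => s.length) true).foldl
      (fun acc s => if acc.any (fun t => PySem.Chars.isIn s t) then acc else acc ++ [s]) []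
  let keep := PySem.Set.ofList maximal
  ((distinct.filter (fun s => PySem.Set.contains keep s)).map pyTitle).map String.ofList

-- ===== PRECONDITION & SPEC =====
def Spec_filter_meanings (meanings_list : List String) (out : List String) : Prop := out = filter_meanings_alt meanings_list
instance (meanings_list : List String) (out : List String) : Decidable (Spec_filter_meanings meanings_list out) := by unfold Spec_filter_meanings; infer_instance

-- ===== CLAIM (what is proved, stated in full; the proofs are below) =====
def Claim_equal_filter_meanings : Prop := ∀ (meanings_list : List String), Dom_filter_meanings meanings_list → Spec_filter_meanings meanings_list (filter_meanings meanings_list)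

-- ===== LEMMAS AND PROOFS =====

-- A's "append unless p" loop is a filter
lemma foldl_keep_if_not {α : Type} (p : α → Bool) (l : List α) :
    l.foldl (fun acc x => if p x then acc else acc ++ [x]) [] = l.filter (fun x => !p x) := by
  have h := PySem.List.foldl_append_if (fun x => !p x) (fun x => x) l []
  rw [show (fun (acc : List α) x => if p x then acc else acc ++ [x])
        = (fun acc x => if (!p x) = true then acc ++ [x] else acc) by
      funext acc x; cases hp : p x <;> simp]
  simpa using h

-- A's "append if not already present" loop is PySem.List.dedup
lemma foldl_dedup (l : List (List Char)) :
    l.foldl (fun acc m => if acc.contains m then acc else acc ++ [m]) [] = PySem.List.dedup l := by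
  rw [PySem.List.dedup_eq_ofList, PySem.Set.ofList_eq_foldl]
  have hf : (fun (acc : List (List Char)) m => if acc.contains m then acc else acc ++ [m])
      = PySem.Set.add (α := List Char) := by
    funext acc x
    simp [PySem.Set.add, PySem.Set.contains_eq_listContains]
  rw [hf]

lemma dedup_snoc (xs : List (List Char)) (x : List Char) :
    PySem.List.dedup (xs ++ [x])
      = if x ∈ xs then PySem.List.dedup xs else PySem.List.dedup xs ++ [x] := by
  rw [PySem.List.dedup_eq_ofList, PySem.Set.ofList_eq_foldl, List.foldl_append]
  rw [← PySem.Set.ofList_eq_foldl]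
  simp only [List.foldl_cons, List.foldl_nil]
  by_cases hx : x ∈ xs
  · simp [PySem.Set.add, hx, PySem.List.dedup_eq_ofList]
  · simp [PySem.Set.add, hx, PySem.List.dedup_eq_ofList]

-- dedup commutes with filter (first occurrences survive a value-based filter)
lemma dedup_filter (p : List Char → Bool) (xs : List (List Char)) :
    PySem.List.dedup (xs.filter p) = (PySem.List.dedup xs).filter p := by
  induction xs using List.reverseRecOn with
  | nil => simp [PySem.List.dedup_eq_ofList, PySem.Set.ofList]
  | append_singleton xs x ih =>
    rw [List.filter_append, dedup_snoc]
    by_cases hp : p x = true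
    · simp only [List.filter_cons, List.filter_nil, hp, if_pos]
      rw [dedup_snoc, ih]
      by_cases hx : x ∈ xs
      · simp [hx, List.mem_filter.mpr ⟨hx, hp⟩]
      · have : x ∉ xs.filter p := fun h => hx (List.mem_filter.mp h).1
        simp [hx, this, List.filter_append, hp]
    · have hp' : p x = false := by simpa using hp
      simp only [List.filter_cons, hp', List.filter_nil, if_neg Bool.false_ne_true, List.append_nil]
      rw [ih]
      by_cases hx : x ∈ xs
      · simp [hx]
      · simp [hx, List.filter_append, hp']

-- the greedy maximal-strings loop of B
def pvStep (acc : List (List Char)) (s : List Char) : List (List Char) :=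
  if acc.any (fun t => PySem.Chars.isIn s t) then acc else acc ++ [s]

lemma infix_eq_of_len_le {s t : List Char} (h : t <:+: s) (hl : s.length ≤ t.length) : t = s :=
  h.sublist.eq_of_length_le hl

-- fold invariant: the accumulator covers everything processed and contains only maximal strings
lemma fold_max_inv :
    ∀ (R P acc : List (List Char)),
    (P ++ R).Pairwise (fun a b => b.length ≤ a.length) →
    (∀ t ∈ acc, t ∈ P) →
    (∀ s ∈ P, ∃ t ∈ acc, s <:+: t) →
    (∀ t ∈ acc, ∀ o ∈ P, o ≠ t → ¬ t <:+: o) →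
    (∀ t ∈ R.foldl pvStep acc, t ∈ P ++ R) ∧
    (∀ s ∈ P ++ R, ∃ t ∈ R.foldl pvStep acc, s <:+: t) ∧
    (∀ t ∈ R.foldl pvStep acc, ∀ o ∈ P ++ R, o ≠ t → ¬ t <:+: o) := by
  intro R
  induction R with
  | nil =>
    intro P acc _ h1 h2 h3
    simpa using ⟨h1, h2, h3⟩
  | cons y R ih =>
    intro P acc hPR h1 h2 h3
    have hassoc : P ++ y :: R = (P ++ [y]) ++ R := by simp
    rw [hassoc] at hPR ⊢
    rw [List.foldl_cons]
    have hlen : ∀ p ∈ P, y.length ≤ p.length := by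
      have := (List.pairwise_append.mp hPR).2.2
      intro p hp
      have hps := (List.pairwise_append.mp ((List.pairwise_append.mp hPR).1)).2.2
      exact hps p hp y (by simp)
    -- maximality of old accumulator elements against the new string s
    have hmaxs : ∀ t ∈ acc, y ≠ t → ¬ t <:+: y := by
      intro t ht hne hinf
      have h1t := h1 t ht
      have : t = y := infix_eq_of_len_le hinf (hlen t h1t)
      exact hne this.symm
    by_cases hany : acc.any (fun t => PySem.Chars.isIn y t) = true
    · obtain ⟨u, hu, hsu⟩ : ∃ u ∈ acc, y <:+: u := by
        simpa [List.any_eq_true, PySem.Chars.isIn_iff_infix] using hany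
      have hstep : pvStep acc y = acc := by simp [pvStep, hany]
      rw [hstep]
      refine ih (P ++ [y]) acc hPR ?_ ?_ ?_
      · intro t ht; exact List.mem_append_left _ (h1 t ht)
      · intro x hx
        rcases List.mem_append.mp hx with hxl | hxs
        · exact h2 x hxl
        · simp only [List.mem_singleton] at hxs; subst hxs; exact ⟨u, hu, hsu⟩
      · intro t ht o ho hne hinf
        rcases List.mem_append.mp ho with hol | hos
        · exact h3 t ht o hol hne hinf
        · simp only [List.mem_singleton] at hos; subst hos
          exact hmaxs t ht hne hinf
    · have hnone : ∀ u ∈ acc, ¬ y <:+: u := by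
        intro u hu hinf
        exact hany (List.any_eq_true.mpr ⟨u, hu, (PySem.Chars.isIn_iff_infix y u).mpr hinf⟩)
      have hstep : pvStep acc y = acc ++ [y] := by simp [pvStep, hany]
      rw [hstep]
      refine ih (P ++ [y]) (acc ++ [y]) hPR ?_ ?_ ?_
      · intro t ht
        rcases List.mem_append.mp ht with htl | hts
        · exact List.mem_append_left _ (h1 t htl)
        · exact List.mem_append_right _ hts
      · intro x hx
        rcases List.mem_append.mp hx with hxl | hxs
        · obtain ⟨t, ht, hxt⟩ := h2 x hxl
          exact ⟨t, List.mem_append_left _ ht, hxt⟩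
        · simp only [List.mem_singleton] at hxs; subst hxs
          exact ⟨x, by simp, List.infix_refl x⟩
      · intro t ht o ho hne hinf
        rcases List.mem_append.mp ht with htl | hts
        · rcases List.mem_append.mp ho with hol | hos
          · exact h3 t htl o hol hne hinf
          · simp only [List.mem_singleton] at hos; subst hos
            exact hmaxs t htl hne hinf
        · simp only [List.mem_singleton] at hts; subst hts
          rcases List.mem_append.mp ho with hol | hos
          · obtain ⟨u, hu, hou⟩ := h2 o hol
            exact hnone u hu (hinf.trans hou)
          · simp only [List.mem_singleton] at hos; subst hos
            exact hne rfl

-- membership in B's maximal list = being a maximal string of the distinct list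
lemma maximal_mem (D : List (List Char)) (m : List Char) :
    (m ∈ (PySem.List.sorted D (fun s => s.length) true).foldl pvStep []
      ↔ m ∈ D ∧ ∀ o ∈ D, o ≠ m → ¬ m <:+: o) := by
  set L := PySem.List.sorted D (fun s => s.length) true with hL
  have hmemL : ∀ x, x ∈ L ↔ x ∈ D := fun x => PySem.List.mem_sorted D _ true x
  have hpair : L.Pairwise (fun a b => b.length ≤ a.length) :=
    PySem.List.sorted_pairwise_rev D (fun s => s.length)
  obtain ⟨i1, i2, i3⟩ := fold_max_inv L [] [] (by simpa using hpair)
    (by simp) (by simp) (by simp)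
  simp only [List.nil_append] at i1 i2 i3
  constructor
  · intro hm
    refine ⟨(hmemL m).mp (i1 m hm), ?_⟩
    intro o ho hne hinf
    exact i3 m hm o ((hmemL o).mpr ho) hne hinf
  · rintro ⟨hmD, hmax⟩
    obtain ⟨t, ht, hmt⟩ := i2 m ((hmemL m).mpr hmD)
    by_cases hte : t = m
    · subst hte; exact ht
    · exact absurd hmt (hmax t ((hmemL t).mp (i1 t ht)) hte)

theorem ports_eq (meanings_list : List String) :
    filter_meanings meanings_list = filter_meanings_alt meanings_list := by
  unfold filter_meanings filter_meanings_alt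
  simp only []
  set C := ((meanings_list.map String.toList).filter
      (fun m => !(PySem.Chars.strip m).isEmpty)).map (fun m => PySem.Chars.strip m) with hC
  congr 1
  congr 1
  rw [foldl_keep_if_not, foldl_dedup, dedup_filter]
  apply List.filter_congr
  intro m hm
  have hmC : m ∈ C := (PySem.List.mem_dedup C m).mp hm
  have hstep : (PySem.List.sorted (PySem.List.dedup C) (fun s => s.length) true).foldl
      (fun acc s => if acc.any (fun t => PySem.Chars.isIn s t) then acc else acc ++ [s]) []
      = (PySem.List.sorted (PySem.List.dedup C) (fun s => s.length) true).foldl pvStep [] := rfl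
  rw [Bool.eq_iff_iff]
  rw [hstep]
  have hcont : PySem.Set.contains
      (PySem.Set.ofList ((PySem.List.sorted (PySem.List.dedup C) (fun s => s.length) true).foldl pvStep []))
      m = true
      ↔ m ∈ (PySem.List.sorted (PySem.List.dedup C) (fun s => s.length) true).foldl pvStep [] := by
    rw [PySem.Set.contains_iff, PySem.Set.mem_ofList]
  rw [hcont, maximal_mem]
  simp only [Bool.not_eq_true', ← Bool.not_eq_true, List.any_eq_true, Bool.and_eq_true,
    decide_eq_true_eq, PySem.Chars.isIn_iff_infix, not_exists]
  constructor
  · intro h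
    refine ⟨hm, ?_⟩
    intro o ho hne hinf
    exact h o ⟨(PySem.List.mem_dedup C o).mp ho, hne.symm, hinf⟩
  · rintro ⟨_, hmax⟩ o ⟨hoC, hne, hinf⟩
    exact hmax o ((PySem.List.mem_dedup C o).mpr hoC) hne.symm hinf

-- ===== VERDICT (by name: the statement is the Claim_ definition above) =====
theorem filter_meanings_spec : Claim_equal_filter_meanings := by
  intro meanings_list _
  unfold Spec_filter_meanings
  exact ports_eq meanings_list
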